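-- pv_equiv track=rewrite | github.com/kkkh0315/Algorithm_Quizzes | Programmers/코딩테스트 연습(Coding Test Practice Quizzes)/DFS,BFS/여행 경로(Trip Route)/여행 경로(Trip Route).py | create_travel
-- ===== SOURCE A (Python) =====
-- def create_travel(travel, tickets):         # 각 공항에서 출발하는 티켓의 리스트를 담은 딕셔너리 생성
--     for element in tickets:
--         if element[0] not in travel:
--             travel[element[0]] = []
--         travel[element[0]].append(element[1])
--     for airport in travel.values():
--         airport.sort()
--     return travel
-- ===== SOURCE B (Python) =====
-- def create_travel(travel, tickets):
--     # Sort the tickets once by destination, then a single grouping pass yields each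
--     # airport's destination list already in sorted order (no per-list .sort()).
--     grouped = {}
--     for t in tickets:                      # establish keys in first-occurrence order
--         grouped.setdefault(t[0], [])
--     for t in sorted(tickets, key=lambda t: t[1]):
--         grouped[t[0]].append(t[1])         # each group comes out sorted
--     for origin in list(travel):            # pre-existing entries: merge and sort once
--         travel[origin] = sorted(travel[origin] + grouped.pop(origin, []))
--     travel.update(grouped)                 # brand-new airports, lists already sorted
--     return travel
-- ===== Notes on version B (the rewrite author's own statement) =====
-- stated objective: alternative
-- what changed: A groups the tickets into travel and then sorts every destination list; B sorts the tickets once by destination and groups them in a single pass, so each new airport's list is built already sorted, and pre-existing travel entries get one sorted() merge with their group.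
import Mathlib
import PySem

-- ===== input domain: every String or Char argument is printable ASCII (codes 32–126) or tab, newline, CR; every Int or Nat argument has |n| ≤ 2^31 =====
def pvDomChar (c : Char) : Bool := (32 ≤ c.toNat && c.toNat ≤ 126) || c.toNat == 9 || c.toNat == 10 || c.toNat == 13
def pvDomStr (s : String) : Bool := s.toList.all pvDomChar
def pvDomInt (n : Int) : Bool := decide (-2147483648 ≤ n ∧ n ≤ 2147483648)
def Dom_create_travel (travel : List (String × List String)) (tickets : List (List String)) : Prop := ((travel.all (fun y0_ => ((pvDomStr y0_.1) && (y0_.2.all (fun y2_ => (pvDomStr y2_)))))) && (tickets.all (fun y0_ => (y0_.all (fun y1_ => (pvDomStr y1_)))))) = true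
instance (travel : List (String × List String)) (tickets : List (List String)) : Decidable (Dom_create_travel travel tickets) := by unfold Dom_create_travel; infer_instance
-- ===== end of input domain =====

-- B sorts the tickets once by destination and groups them in a single pass (each
-- airport's list comes out already sorted), instead of A's group-then-sort-every-list;
-- same return value. Like A, the Python B mutates the `travel` dict in place — the
-- equivalence proved here is about the RETURN value.

-- ticket accessors: element[0] / element[1] (total under Pre_, which demands length ≥ 2)
def pvOrg (t : List String) : String := PySem.List.pyGetD t 0 ""
def pvDst (t : List String) : String := PySem.List.pyGetD t 1 ""

-- ===== PORT A =====
def create_travel (travel : List (String × List String)) (tickets : List (List String)) : List (String × List String) :=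
  let d0 : PySem.Dict String (List String) := PySem.Dict.mk travel
  -- for element in tickets: if element[0] not in travel: travel[element[0]] = []; travel[element[0]].append(element[1])
  let d := tickets.foldl (fun d t =>
    let d := if d.contains (pvOrg t) then d else d.insert (pvOrg t) ([] : List String)
    d.modify (pvOrg t) [] (fun v => v ++ [pvDst t])) d0
  -- for airport in travel.values(): airport.sort()
  d.items.map (fun kv => (kv.1, PySem.List.sorted kv.2 (fun x => x) false))

-- ===== PORT B =====
def create_travel_alt (travel : List (String × List String)) (tickets : List (List String)) : List (String × List String) :=
  -- grouped = {}; for t in tickets: grouped.setdefault(t[0], [])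
  let g0 : PySem.Dict String (List String) :=
    tickets.foldl (fun g t => g.setdefault (pvOrg t) ([] : List String)) PySem.Dict.empty
  -- for t in sorted(tickets, key=lambda t: t[1]): grouped[t[0]].append(t[1])
  let g := (PySem.List.sorted tickets pvDst false).foldl
    (fun g t => g.modify (pvOrg t) [] (fun v => v ++ [pvDst t])) g0
  -- for origin in list(travel): travel[origin] = sorted(travel[origin] + grouped.pop(origin, []))
  let res := travel.map (fun kv => (kv.1, PySem.List.sorted (kv.2 ++ g.getD kv.1 []) (fun x => x) false))
  -- travel.update(grouped)  (only the keys not popped above remain in grouped)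
  res ++ g.items.filter (fun kv => !(travel.any (fun p => p.1 == kv.1)))

-- ===== PRECONDITION & SPEC =====
-- Pre_ excludes (a) tickets with fewer than 2 entries, on which A raises IndexError, and
-- (b) `travel` association lists with duplicate keys, which do not denote a Python dict
-- value (duplicates collapse before A ever runs), so A's behaviour there is accidental.
def Pre_create_travel (travel : List (String × List String)) (tickets : List (List String)) : Prop :=
  (travel.map (fun p => p.1)).Nodup ∧ ∀ t ∈ tickets, 2 ≤ t.length
instance (travel : List (String × List String)) (tickets : List (List String)) : Decidable (Pre_create_travel travel tickets) := by unfold Pre_create_travel; infer_instance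
def pvWitness_create_travel : (List (String × List String)) × List (List String) :=
  ([("ICN", ["SFO"])], [["ICN", "ATL"], ["ATL", "ICN"]])

def Spec_create_travel (travel : List (String × List String)) (tickets : List (List String)) (out : List (String × List String)) : Prop := out = create_travel_alt travel tickets
instance (travel : List (String × List String)) (tickets : List (List String)) (out : List (String × List String)) : Decidable (Spec_create_travel travel tickets out) := by unfold Spec_create_travel; infer_instance

-- ===== CLAIM (what is proved, stated in full; the proofs are below) =====
def Claim_equal_create_travel : Prop := ∀ (travel : List (String × List String)) (tickets : List (List String)), Dom_create_travel travel tickets → Pre_create_travel travel tickets → Spec_create_travel travel tickets (create_travel travel tickets)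

-- ===== LEMMAS AND PROOFS =====

def pvDests (ts : List (List String)) (k : String) : List String :=
  (ts.filter (fun t => pvOrg t == k)).map pvDst


theorem pvStepA (d : PySem.Dict String (List String)) (o : String) (x : String) :
    (if d.contains o then d else d.insert o ([] : List String)).modify o [] (fun v => v ++ [x])
      = d.modify o [] (fun v => v ++ [x]) := by
  by_cases h : d.contains o
  · simp [h]
  · simp only [Bool.not_eq_true] at h
    simp only [h, PySem.Dict.modify, Bool.false_eq_true, if_false]
    rw [PySem.Dict.getD_insert_self, PySem.Dict.getD_of_not_contains d _ h]
    have hne : ∀ p ∈ d.items, (p.1 == o) = false := by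
      intro p hp
      by_contra hb
      simp only [Bool.not_eq_false] at hb
      have : d.contains o = true := by
        simp only [PySem.Dict.contains, List.any_eq_true]
        exact ⟨p, hp, hb⟩
      simp [this] at h
    have hd : d.insert o ([] : List String) = PySem.Dict.mk (d.items ++ [(o, [])]) := by
      simp [PySem.Dict.insert, h]
    rw [hd]
    have hc : (PySem.Dict.mk (d.items ++ [(o, ([] : List String))])).contains o = true := by
      simp [PySem.Dict.contains]
    apply PySem.Dict.ext
    simp only [PySem.Dict.insert, hc, if_true, h, Bool.false_eq_true, if_false]
    simp only [List.map_append, List.map_cons, List.map_nil, beq_self_eq_true, if_true]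
    rw [List.map_congr_left
      (fun p hp => by simp [hne p hp] :
        ∀ p ∈ d.items, (if (p.1 == o) = true then (o, [] ++ [x]) else p) = p)]
    simp

theorem pvSetdefault_getD (g : PySem.Dict String (List String)) (k c : String) :
    (g.setdefault k ([] : List String)).getD c [] = g.getD c [] := by
  by_cases h : g.contains k
  · simp [PySem.Dict.setdefault, h]
  · simp only [Bool.not_eq_true] at h
    have hd : PySem.Dict.mk (g.items ++ [(k, ([] : List String))]) = g.insert k [] := by
      simp [PySem.Dict.insert, h]
    simp only [PySem.Dict.setdefault, h, Bool.false_eq_true, if_false]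
    rw [hd, PySem.Dict.getD_insert]
    by_cases hck : c = k
    · subst hck
      simp [PySem.Dict.getD_of_not_contains g _ h]
    · simp [hck]

theorem pvSetdefault_keys (g : PySem.Dict String (List String)) (k : String) :
    (g.setdefault k ([] : List String)).keys = PySem.Set.add g.keys k := by
  by_cases h : g.contains k
  · rw [PySem.Set.add_of_mem ((PySem.Dict.contains_iff_mem_keys g k).mp h)]
    simp [PySem.Dict.setdefault, h]
  · simp only [Bool.not_eq_true] at h
    have hk : k ∉ g.keys := by
      intro hm
      simp [(PySem.Dict.contains_iff_mem_keys g k).mpr hm] at h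
    rw [PySem.Set.add_of_not_mem hk]
    simp [PySem.Dict.setdefault, h, PySem.Dict.keys]

theorem pvG0_keys (ts : List (List String)) (g : PySem.Dict String (List String)) :
    (ts.foldl (fun g t => g.setdefault (pvOrg t) ([] : List String)) g).keys
      = PySem.Set.update g.keys (ts.map pvOrg) := by
  induction ts generalizing g with
  | nil => simp [PySem.Set.update]
  | cons t ts ih =>
    simp only [List.foldl_cons, List.map_cons, PySem.Set.update_cons]
    rw [ih, pvSetdefault_keys]

theorem pvG0_getD (ts : List (List String)) (g : PySem.Dict String (List String)) (c : String) :
    (ts.foldl (fun g t => g.setdefault (pvOrg t) ([] : List String)) g).getD c []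
      = g.getD c [] := by
  induction ts generalizing g with
  | nil => simp
  | cons t ts ih =>
    simp only [List.foldl_cons]
    rw [ih, pvSetdefault_getD]

theorem pvFold_getD (ts : List (List String))
    (d : PySem.Dict String (List String)) (c : String) :
    (ts.foldl (fun d t => d.modify (pvOrg t) [] (fun v => v ++ [pvDst t])) d).getD c []
      = d.getD c [] ++ pvDests ts c := by
  have := PySem.Dict.getD_foldl_modify_append (ts.map (fun t => (pvOrg t, pvDst t))) d c
  rw [List.foldl_map] at this
  simp only [this, List.filter_map, List.map_map]
  rfl

theorem pvSorted_congr_perm {a b : List String} (h : a.Perm b) :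
    PySem.List.sorted a (fun x => x) false = PySem.List.sorted b (fun x => x) false := by
  apply PySem.List.eq_of_perm_of_pairwise_le_of_injective (fun x : String => x)
    (fun x y hxy => hxy)
  · exact ((PySem.List.sorted_perm a _ false).trans h).trans
      (PySem.List.sorted_perm b _ false).symm
  · exact PySem.List.sorted_pairwise a _
  · exact PySem.List.sorted_pairwise b _

theorem pvDests_sorted (ts : List (List String)) (k : String) :
    pvDests (PySem.List.sorted ts pvDst false) k
      = PySem.List.sorted (pvDests ts k) (fun x => x) false := by
  apply PySem.List.eq_of_perm_of_pairwise_le_of_injective (fun x : String => x)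
    (fun x y hxy => hxy)
  · exact (((PySem.List.sorted_perm ts pvDst false).filter _).map pvDst).trans
      (PySem.List.sorted_perm _ _ false).symm
  · simp only [pvDests]
    rw [List.pairwise_map]
    exact ((PySem.List.sorted_pairwise ts pvDst).filter _)
  · exact PySem.List.sorted_pairwise _ _

theorem pvDests_perm (ts : List (List String)) (c : String) :
    (pvDests (PySem.List.sorted ts pvDst false) c).Perm (pvDests ts c) :=
  ((PySem.List.sorted_perm ts pvDst false).filter _).map pvDst


-- ===== VERDICT (by name: the statement is the Claim_ definition above) =====
theorem create_travel_spec : Claim_equal_create_travel := by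
  intro travel tickets _ hpre
  obtain ⟨hnd, -⟩ := hpre
  unfold Spec_create_travel create_travel create_travel_alt
  dsimp only
  rw [PySem.List.foldl_congr_mem tickets _
        (fun d t => d.modify (pvOrg t) [] (fun v => v ++ [pvDst t]))
        (PySem.Dict.mk travel)
        (fun acc t _ => pvStepA acc (pvOrg t) (pvDst t))]
  set K : List String := travel.map (fun p => p.1) with hK
  set d0 : PySem.Dict String (List String) := PySem.Dict.mk travel with hd0
  set st := PySem.List.sorted tickets pvDst false with hst
  set dA := tickets.foldl (fun d t => d.modify (pvOrg t) [] (fun v => v ++ [pvDst t])) d0 with hdA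
  set g0 := tickets.foldl (fun g t => g.setdefault (pvOrg t) ([] : List String)) (PySem.Dict.empty) with hg0
  set g := st.foldl (fun g t => g.modify (pvOrg t) [] (fun v => v ++ [pvDst t])) g0 with hg
  have hd0keys : d0.keys = K := PySem.Dict.keys_mk travel
  have hndk : d0.keys.Nodup := by rw [hd0keys]; exact hnd
  have hAkeys : dA.keys = PySem.Set.update K (tickets.map pvOrg) := by
    rw [hdA, PySem.Dict.keys_foldl_modify_key tickets pvOrg []
      (fun d t v => v ++ [pvDst t]) d0, hd0keys]
  have hAnodup : dA.keys.Nodup := by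
    rw [hdA]; exact PySem.Dict.nodup_keys_foldl_modify_key _ _ _ _ _ hndk
  have hAgetD : ∀ c, dA.getD c [] = d0.getD c [] ++ pvDests tickets c := by
    intro c; rw [hdA]; exact pvFold_getD tickets d0 c
  have hAitems : dA.items = dA.keys.map (fun k => (k, dA.getD k [])) :=
    PySem.Dict.items_eq_map_keys dA hAnodup []
  have hg0keys : g0.keys = PySem.Set.ofList (tickets.map pvOrg) := by
    rw [hg0, pvG0_keys, PySem.Dict.keys_empty, PySem.Set.update_nil_left]
  have hg0getD : ∀ c, g0.getD c [] = [] := by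
    intro c; rw [hg0, pvG0_getD]; exact PySem.Dict.getD_empty c []
  have hg0nodup : g0.keys.Nodup := hg0keys ▸ PySem.Set.nodup_ofList _
  have hmemst : ∀ y ∈ st.map pvOrg, y ∈ PySem.Set.ofList (tickets.map pvOrg) := by
    intro y hy
    rw [PySem.Set.mem_ofList]
    obtain ⟨t, ht, rfl⟩ := List.mem_map.mp hy
    exact List.mem_map.mpr ⟨t, (PySem.List.sorted_perm tickets pvDst false).mem_iff.mp ht, rfl⟩
  have hgkeys : g.keys = PySem.Set.ofList (tickets.map pvOrg) := by
    rw [hg, PySem.Dict.keys_foldl_modify_key st pvOrg [] (fun d t v => v ++ [pvDst t]) g0,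
      hg0keys, PySem.Set.update_eq_append_filter,
      List.filter_eq_nil_iff.mpr ?_, List.append_nil]
    intro y hy
    rw [PySem.Set.mem_ofList] at hy
    simp only [Bool.not_eq_true', Bool.not_eq_false]
    exact (PySem.Set.contains_iff _ y).mpr (hmemst y hy)
  have hgnodup : g.keys.Nodup := by
    rw [hg]; exact PySem.Dict.nodup_keys_foldl_modify_key _ _ _ _ _ hg0nodup
  have hggetD : ∀ c, g.getD c [] = pvDests st c := by
    intro c; rw [hg, pvFold_getD st g0 c, hg0getD, List.nil_append]
  have hgitems : g.items = (PySem.Set.ofList (tickets.map pvOrg)).map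
      (fun k => (k, pvDests st k)) := by
    rw [PySem.Dict.items_eq_map_keys g hgnodup [], hgkeys]
    exact List.map_congr_left (fun k _ => by rw [hggetD])
  rw [hAitems, List.map_map, hAkeys, PySem.Set.update_eq_append_filter, List.map_append]
  rw [hgitems, List.filter_map]
  have hpred : ∀ k : String, (!PySem.Set.contains K k) = !(travel.any (fun p => p.1 == k)) := by
    intro k
    by_cases hk : k ∈ K
    · rw [(PySem.Set.contains_iff K k).mpr hk]
      obtain ⟨p, hp, he⟩ := List.mem_map.mp (hK ▸ hk)
      rw [List.any_eq_true.mpr ⟨p, hp, by simp [he]⟩]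
    · have h1 : PySem.Set.contains K k = false := by
        rw [Bool.eq_false_iff]
        intro hc; exact hk ((PySem.Set.contains_iff K k).mp hc)
      have h2 : travel.any (fun p => p.1 == k) = false := by
        rw [Bool.eq_false_iff]
        intro hc
        obtain ⟨p, hp, he⟩ := List.any_eq_true.mp hc
        exact hk (hK ▸ List.mem_map.mpr ⟨p, hp, by simpa using he⟩)
      rw [h1, h2]
  congr 1
  · -- pre-existing keys of travel
    rw [hK, List.map_map]
    apply List.map_congr_left
    intro kv hkv
    have hmem : (kv.1, kv.2) ∈ d0.items := hkv
    have hv : d0.getD kv.1 [] = kv.2 := PySem.Dict.getD_of_mem_items d0 hmem hndk []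
    show (kv.1, PySem.List.sorted (dA.getD kv.1 []) (fun x => x) false) = _
    rw [hAgetD, hv, hggetD]
    exact Prod.ext rfl
      (pvSorted_congr_perm ((pvDests_perm tickets kv.1).append_left kv.2)).symm
  · -- brand-new keys
    rw [List.filter_congr (fun k _ => by
      show (!PySem.Set.contains K k) = ((fun kv => !(travel.any (fun p => p.1 == kv.1))) ∘ (fun k => (k, pvDests st k))) k
      exact hpred k)]
    apply List.map_congr_left
    intro k hk
    obtain ⟨hkS, hkp⟩ := List.mem_filter.mp hk
    have hknot : k ∉ K := by
      simp only [Function.comp] at hkp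
      intro hkk
      rw [(hpred k).symm] at hkp
      rw [Bool.not_eq_eq_eq_not, Bool.not_true, Bool.eq_false_iff] at hkp
      exact hkp ((PySem.Set.contains_iff K k).mpr hkk)
    have hc : d0.contains k = false := by
      rw [Bool.eq_false_iff]
      intro hcc
      exact hknot (hd0keys ▸ (PySem.Dict.contains_iff_mem_keys d0 k).mp hcc)
    show (k, PySem.List.sorted (dA.getD k []) (fun x => x) false) = (k, pvDests st k)
    rw [hAgetD, PySem.Dict.getD_of_not_contains d0 _ hc, List.nil_append,
      ← pvDests_sorted tickets k]
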